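-- pv_equiv track=rewrite | github.com/Taufique01/penguin_assessment | task_2.py | efficientJanitor
-- ===== SOURCE A (Python) =====
-- max_weight=3
--
-- def efficientJanitor(weight):
--
--     weight_len=len(weight)
--     weight_sorted=sorted(weight)
--     weight_marker=[False for i in range(weight_len)]
--
--     count_trip=0
--     for i in range(weight_len-1, -1, -1):
--
--         if weight_marker[i]:
--             continue
--
--         w=weight_sorted[i]
--         weight_marker[i]=True
--
--         for j in range(i-1,-1,-1):
--             if w+weight_sorted[j]<=max_weight and not weight_marker[j]:
--                 w=w+weight_sorted[j]
--                 weight_marker[j]=True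
--
--         count_trip=count_trip+1
--
--     return count_trip
-- ===== SOURCE B (Python) =====
-- max_weight = 3
--
-- def efficientJanitor(weight):
--     # Keep the remaining items as a sorted ascending list.  Each trip pops the
--     # heaviest item, then uses binary search (successor queries) to jump
--     # straight to the largest still-eligible item that fits, deleting it on
--     # use, instead of scanning every smaller item one by one.
--     rem = sorted(weight)
--     trips = 0
--     while rem:
--         w = rem.pop()
--         pos = len(rem)
--         while True:
--             # largest index < pos whose value fits, via binary search
--             lo, hi = 0, pos
--             while lo < hi:
--                 mid = (lo + hi) // 2
--                 if rem[mid] <= max_weight - w: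
--                     lo = mid + 1
--                 else:
--                     hi = mid
--             if lo == 0:
--                 break
--             pos = lo - 1
--             w += rem.pop(pos)
--         trips += 1
--     return trips
-- ===== Notes on version B (the rewrite author's own statement) =====
-- stated objective: faster
-- what changed: Replaces A's marker array and its full descending inner scan per trip by a sorted remaining list with binary-search successor queries: each trip pops the heaviest item and repeatedly binary-searches for the largest still-eligible fitting item, deleting it on use, so no per-trip linear scan of all smaller items remains.
import Mathlib
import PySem

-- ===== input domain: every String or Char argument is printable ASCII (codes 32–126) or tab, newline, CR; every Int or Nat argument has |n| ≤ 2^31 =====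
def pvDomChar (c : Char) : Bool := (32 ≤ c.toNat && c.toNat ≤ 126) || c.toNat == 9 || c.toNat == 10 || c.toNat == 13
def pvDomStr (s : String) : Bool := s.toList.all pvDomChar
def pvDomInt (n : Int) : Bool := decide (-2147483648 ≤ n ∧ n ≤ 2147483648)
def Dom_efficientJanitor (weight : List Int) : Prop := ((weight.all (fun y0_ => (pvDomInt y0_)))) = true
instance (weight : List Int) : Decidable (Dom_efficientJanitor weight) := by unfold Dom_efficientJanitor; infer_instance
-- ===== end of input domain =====

-- B replaces A's marker array and full descending inner scan per trip by a sorted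
-- remaining list with hand-written binary-search successor queries, deleting each
-- packed item on use (objective: faster; measured).

-- ===== PORT A =====
-- the body of A's inner 'for j in range(i-1,-1,-1)' loop; state = (w, weight_marker)
def pvStepInner (ws : List Int) (st : Int × List Bool) (j : Int) : Int × List Bool :=
  if st.1 + PySem.List.pyGetD ws j 0 ≤ 3 ∧ PySem.List.pyGetD st.2 j false = false then
    (st.1 + PySem.List.pyGetD ws j 0, PySem.List.pySetD st.2 j true)
  else st

-- A's inner loop
def pvInnerA (ws : List Int) (i : Int) (w : Int) (m : List Bool) : Int × List Bool :=
  (PySem.List.pyRange (i - 1) (-1) (-1)).foldl (pvStepInner ws) (w, m)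

-- the body of A's outer 'for i in range(weight_len-1,-1,-1)' loop; state = (count_trip, weight_marker)
def pvStepOuter (ws : List Int) (st : Int × List Bool) (i : Int) : Int × List Bool :=
  if PySem.List.pyGetD st.2 i false = true then st
  else
    (st.1 + 1,
     (pvInnerA ws i (PySem.List.pyGetD ws i 0) (PySem.List.pySetD st.2 i true)).2)

def efficientJanitor (weight : List Int) : Int :=
  let weight_len : Int := weight.length
  let weight_sorted := PySem.List.sorted weight (fun x => x) false
  let weight_marker : List Bool := (PySem.List.pyRange 0 weight_len 1).map (fun _ => false)
  ((PySem.List.pyRange (weight_len - 1) (-1) (-1)).foldl (pvStepOuter weight_sorted)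
      (0, weight_marker)).1

-- ===== PORT B =====
-- B's hand-written binary search 'while lo < hi: …'; the fuel argument only
-- bounds the iteration count (hi - lo shrinks every pass, so fuel = hi - lo
-- always suffices) — it never changes the computed value
def pvBSF (rem : List Int) (t : Int) : Nat → Nat → Nat → Nat
  | 0, lo, _ => lo
  | fuel + 1, lo, hi =>
    if lo < hi then
      let mid := (lo + hi) / 2
      if rem.getD mid 0 ≤ t then pvBSF rem t fuel (mid + 1) hi else pvBSF rem t fuel lo mid
    else lo

def pvBS (rem : List Int) (t : Int) (lo hi : Nat) : Nat :=
  pvBSF rem t (hi - lo) lo hi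

-- B's inner 'while True:' trip loop; returns the remaining list.  pos strictly
-- decreases every iteration, so fuel = pos always suffices — the fuel never
-- changes the computed value
def pvTripF : Nat → Int → Nat → List Int → List Int
  | 0, _, _, rem => rem
  | fuel + 1, w, pos, rem =>
    let lo := pvBS rem (3 - w) 0 pos
    if lo = 0 then rem
    else pvTripF fuel (w + rem.getD (lo - 1) 0) (lo - 1) (rem.eraseIdx (lo - 1))

def pvTrip (w : Int) (pos : Nat) (rem : List Int) : List Int :=
  pvTripF pos w pos rem

-- B's outer 'while rem:' loop (rem.pop() takes the last element); every trip
-- shortens the list, so fuel = the list length always suffices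
def pvOuterF : Nat → List Int → Int
  | 0, _ => 0
  | fuel + 1, rem =>
    if h : rem = [] then 0
    else 1 + pvOuterF fuel (pvTrip (rem.getLast h) rem.dropLast.length rem.dropLast)

def pvOuter (rem : List Int) : Int :=
  pvOuterF rem.length rem

def efficientJanitor_alt (weight : List Int) : Int :=
  pvOuter (PySem.List.sorted weight (fun x => x) false)

-- ===== PRECONDITION & SPEC =====
def Spec_efficientJanitor (weight : List Int) (out : Int) : Prop := out = efficientJanitor_alt weight
instance (weight : List Int) (out : Int) : Decidable (Spec_efficientJanitor weight out) := by unfold Spec_efficientJanitor; infer_instance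

-- ===== CLAIM (what is proved, stated in full; the proofs are below) =====
def Claim_equal_efficientJanitor : Prop := ∀ (weight : List Int), Dom_efficientJanitor weight → Spec_efficientJanitor weight (efficientJanitor weight)

-- ===== LEMMAS AND PROOFS =====

-- proof-side reference algorithm: one descending sweep over the remaining items
def pvChain : Int → List Int → List Int
  | _, [] => []
  | w, x :: xs => if w + x ≤ 3 then pvChain (w + x) xs else x :: pvChain w xs

lemma pvChain_sublist (xs : List Int) : ∀ w : Int, (pvChain w xs).Sublist xs := by
  induction xs with
  | nil => intro w; simp [pvChain]
  | cons x xs ih =>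
    intro w
    simp only [pvChain]
    by_cases h : w + x ≤ 3
    · rw [if_pos h]; exact (ih (w + x)).cons x
    · rw [if_neg h]; exact (ih w).cons₂ x

lemma pvChain_length_le (xs : List Int) (w : Int) : (pvChain w xs).length ≤ xs.length :=
  (pvChain_sublist xs w).length_le

-- trip count of repeated sweeps
def pvGo : List Int → Int
  | [] => 0
  | x :: xs => 1 + pvGo (pvChain x xs)
termination_by l => l.length
decreasing_by
  have := pvChain_length_le xs x
  simp only [List.length_cons]
  omega

-- the elements of ws at indices j < k that marker m leaves unmarked, largest index first
def pvRem (ws : List Int) (m : List Bool) : Nat → List Int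
  | 0 => []
  | k + 1 => if m.getD k false = true then pvRem ws m k else ws.getD k 0 :: pvRem ws m k

lemma pvRem_set (ws : List Int) (m : List Bool) (k : Nat) (v : Bool) :
    ∀ j : Nat, j ≤ k → pvRem ws (m.set k v) j = pvRem ws m j := by
  intro j
  induction j with
  | zero => intro _; simp [pvRem]
  | succ j ih =>
    intro hj
    have hle : j ≤ k := by omega
    simp only [pvRem, List.getD_eq_getElem?_getD, List.getElem?_set_ne (by omega : k ≠ j), ih hle]

lemma pvInnerA_spec (ws : List Int) :
    ∀ (k : Nat) (w : Int) (m : List Bool), k ≤ m.length →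
      (pvInnerA ws (k : Int) w m).2.length = m.length ∧
      (∀ j : Nat, k ≤ j → (pvInnerA ws (k : Int) w m).2.getD j false = m.getD j false) ∧
      pvRem ws (pvInnerA ws (k : Int) w m).2 k = pvChain w (pvRem ws m k) := by
  intro k
  induction k with
  | zero =>
    intro w m _
    have h0 : pvInnerA ws ((0 : Nat) : Int) w m = (w, m) := by
      unfold pvInnerA
      rw [PySem.List.pyRange_neg_one_eq_nil (by omega)]
      rfl
    rw [h0]
    exact ⟨rfl, fun j _ => rfl, by simp [pvRem, pvChain]⟩
  | succ k ih =>
    intro w m hk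
    have hk' : k ≤ m.length := by omega
    have hkm : k < m.length := by omega
    have hcons : pvInnerA ws ((k + 1 : Nat) : Int) w m
        = pvInnerA ws (k : Int) (pvStepInner ws (w, m) (k : Int)).1
            (pvStepInner ws (w, m) (k : Int)).2 := by
      unfold pvInnerA
      have h1 : (((k + 1 : Nat) : Int) - 1) = (k : Int) := by push_cast; ring
      rw [h1, PySem.List.pyRange_neg_one_cons (by omega)]
      simp
    by_cases hmk : m.getD k false = true
    · -- index k already marked: the step is a no-op
      have hstep : pvStepInner ws (w, m) (k : Int) = (w, m) := by
        unfold pvStepInner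
        rw [if_neg]
        simp [-List.getD_eq_getElem?_getD, hmk]
      rw [hcons, hstep]
      obtain ⟨hl, hag, hrem⟩ := ih w m hk'
      refine ⟨hl, fun j hj => hag j (by omega), ?_⟩
      have hresk : (pvInnerA ws (k : Int) w m).2.getD k false = true := by
        rw [hag k le_rfl]; exact hmk
      rw [pvRem, pvRem, if_pos hresk, if_pos hmk, hrem]
    · have hmkf : m.getD k false = false := by
        cases h : m.getD k false
        · rfl
        · exact absurd h hmk
      by_cases hfit : w + ws.getD k 0 ≤ 3
      · -- unmarked and it fits: pack ws[k], mark it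
        have hstep : pvStepInner ws (w, m) (k : Int)
            = (w + ws.getD k 0, m.set k true) := by
          unfold pvStepInner
          simp only [PySem.List.pyGetD_natCast, PySem.List.pySetD_natCast]
          rw [if_pos ⟨hfit, hmkf⟩]
        rw [hcons, hstep]
        obtain ⟨hl, hag, hrem⟩ := ih (w + ws.getD k 0) (m.set k true) (by simpa using hk')
        have hlen : (pvInnerA ws (k : Int) (w + ws.getD k 0) (m.set k true)).2.length
            = m.length := by simpa using hl
        refine ⟨hlen, ?_, ?_⟩
        · intro j hj
          rw [hag j (by omega), List.getD_eq_getElem?_getD,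
            List.getElem?_set_ne (by omega : k ≠ j), ← List.getD_eq_getElem?_getD]
        · have hresk : (pvInnerA ws (k : Int) (w + ws.getD k 0) (m.set k true)).2.getD k false
              = true := by
            rw [hag k le_rfl, List.getD_eq_getElem?_getD, List.getElem?_set_self hkm]
            rfl
          rw [pvRem, pvRem, if_pos hresk, if_neg (by simp [-List.getD_eq_getElem?_getD, hmkf]), hrem,
            pvRem_set ws m k true k le_rfl, pvChain, if_pos hfit]
      · -- unmarked but it does not fit: the step is a no-op
        have hstep : pvStepInner ws (w, m) (k : Int) = (w, m) := by
          unfold pvStepInner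
          rw [if_neg]
          simp only [PySem.List.pyGetD_natCast]
          tauto
        rw [hcons, hstep]
        obtain ⟨hl, hag, hrem⟩ := ih w m hk'
        refine ⟨hl, fun j hj => hag j (by omega), ?_⟩
        have hresk : (pvInnerA ws (k : Int) w m).2.getD k false = false := by
          rw [hag k le_rfl]; exact hmkf
        rw [pvRem, pvRem, if_neg (by simp [-List.getD_eq_getElem?_getD, hresk]), if_neg (by simp [-List.getD_eq_getElem?_getD, hmkf]), hrem,
          pvChain, if_neg hfit]

lemma pvGo_cons (x : Int) (xs : List Int) : pvGo (x :: xs) = 1 + pvGo (pvChain x xs) := by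
  rw [pvGo]

lemma pvOuterA_spec (ws : List Int) :
    ∀ (k : Nat) (c : Int) (m : List Bool), k ≤ m.length →
      ((PySem.List.pyRange ((k : Int) - 1) (-1) (-1)).foldl (pvStepOuter ws) (c, m)).1
        = c + pvGo (pvRem ws m k) := by
  intro k
  induction k with
  | zero =>
    intro c m _
    rw [PySem.List.pyRange_neg_one_eq_nil (by omega)]
    simp [pvRem, pvGo]
  | succ k ih =>
    intro c m hk
    have hk' : k ≤ m.length := by omega
    have hkm : k < m.length := by omega
    have h1 : (((k + 1 : Nat) : Int) - 1) = (k : Int) := by push_cast; ring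
    rw [h1, PySem.List.pyRange_neg_one_cons (by omega), List.foldl_cons]
    by_cases hmk : m.getD k false = true
    · have hstep : pvStepOuter ws (c, m) (k : Int) = (c, m) := by
        unfold pvStepOuter
        rw [if_pos]
        simp only [PySem.List.pyGetD_natCast]
        exact hmk
      rw [hstep, ih c m hk', pvRem, if_pos hmk]
    · have hmkf : m.getD k false = false := by
        cases h : m.getD k false
        · rfl
        · exact absurd h hmk
      have hstep : pvStepOuter ws (c, m) (k : Int)
          = (c + 1, (pvInnerA ws (k : Int) (ws.getD k 0) (m.set k true)).2) := by
        unfold pvStepOuter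
        rw [if_neg (by simp [-List.getD_eq_getElem?_getD, hmkf])]
        simp only [PySem.List.pyGetD_natCast, PySem.List.pySetD_natCast]
      obtain ⟨hl, _, hrem⟩ :=
        pvInnerA_spec ws k (ws.getD k 0) (m.set k true) (by simpa using hk')
      rw [hstep, ih (c + 1) _ (by rw [hl]; simpa using hk'), hrem,
        pvRem_set ws m k true k le_rfl, pvRem, if_neg (by simp [-List.getD_eq_getElem?_getD, hmkf]), pvGo_cons]
      ring

lemma pvRem_replicate (ws : List Int) (n : Nat) :
    ∀ k : Nat, k ≤ ws.length → pvRem ws (List.replicate n false) k = (ws.take k).reverse := by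
  intro k
  induction k with
  | zero => intro _; simp [pvRem]
  | succ k ih =>
    intro hk
    have hk' : k < ws.length := by omega
    have hrep : ((List.replicate n false).getD k false = true) = False := by
      by_cases h : k < n <;> simp [List.getD_eq_getElem?_getD, h]
    rw [pvRem, List.take_add_one, List.reverse_append]
    simp only [hrep, if_false, ih (by omega)]
    simp [List.getD_eq_getElem?_getD, List.getElem?_eq_getElem hk']

-- A's result is pvGo of the descending-sorted list
lemma pvA_char (weight : List Int) :
    efficientJanitor weight = pvGo ((PySem.List.sorted weight (fun x => x) false).reverse) := by
  unfold efficientJanitor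
  set n := weight.length with hn
  set ws := PySem.List.sorted weight (fun x => x) false with hws
  have hlen : ws.length = n := (PySem.List.sorted_perm weight (fun x => x) false).length_eq
  have hm0 : (PySem.List.pyRange 0 (n : Int) 1).map (fun _ => false)
      = List.replicate n false := by
    rw [List.map_const']
    simp [PySem.List.length_pyRange_one]
  simp only [hm0]
  rw [pvOuterA_spec ws n 0 (List.replicate n false) (by simp),
    pvRem_replicate ws n n (by omega), ← hlen, List.take_length]
  simp

-- ==== B-side lemmas ====

-- the binary search computes the boundary of the fitting prefix
lemma pvBSF_count (rem : List Int) (t : Int) (L : Nat) :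
    ∀ fuel lo hi, hi - lo ≤ fuel → lo ≤ hi →
      (∀ i, lo ≤ i → i < hi → (rem.getD i 0 ≤ t ↔ i < L)) →
      pvBSF rem t fuel lo hi = max lo (min hi L) := by
  intro fuel
  induction fuel with
  | zero =>
    intro lo hi hd hle _
    rw [pvBSF]
    omega
  | succ fuel ih =>
    intro lo hi hd hle hb
    rw [pvBSF]
    by_cases h : lo < hi
    · rw [if_pos h]
      by_cases hv : rem.getD ((lo + hi) / 2) 0 ≤ t
      · rw [if_pos hv]
        have hmid : (lo + hi) / 2 < L := (hb _ (by omega) (by omega)).1 hv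
        rw [ih ((lo + hi) / 2 + 1) hi (by omega) (by omega)
          (fun i h1 h2 => hb i (by omega) h2)]
        omega
      · rw [if_neg hv]
        have hmid : ¬ ((lo + hi) / 2 < L) := fun hc => hv ((hb _ (by omega) (by omega)).2 hc)
        rw [ih lo ((lo + hi) / 2) (by omega) (by omega)
          (fun i h1 h2 => hb i h1 (by omega))]
        omega
    · rw [if_neg h]; omega

lemma pvBS_count (rem : List Int) (t : Int) (L hi : Nat)
    (hb : ∀ i, i < hi → (rem.getD i 0 ≤ t ↔ i < L)) :
    pvBS rem t 0 hi = min hi L := by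
  unfold pvBS
  rw [pvBSF_count rem t L (hi - 0) 0 hi (by omega) (by omega)
    (fun i _ h2 => hb i h2)]
  omega

-- in a sorted list, 'value ≤ t' holds exactly on the takeWhile prefix
lemma pvSorted_boundary (t : Int) :
    ∀ ys : List Int, ys.Pairwise (· ≤ ·) → ∀ i, i < ys.length →
      (ys.getD i 0 ≤ t ↔ i < (ys.takeWhile (fun x => decide (x ≤ t))).length) := by
  intro ys
  induction ys with
  | nil => intro _ i hi; simp at hi
  | cons y ys ih =>
    intro hp i hi
    rw [List.pairwise_cons] at hp
    by_cases hy : y ≤ t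
    · rw [List.takeWhile_cons, if_pos (by simpa using hy)]
      cases i with
      | zero => simpa using hy
      | succ i =>
        have := ih hp.2 i (by simpa using hi)
        simpa using this
    · rw [List.takeWhile_cons, if_neg (by simpa using hy)]
      simp only [List.length_nil]
      cases i with
      | zero => simpa using hy
      | succ i =>
        simp only [List.getD_cons_succ]
        constructor
        · intro hc
          have hmem : ys.getD i 0 ∈ ys := by
            rw [List.getD_eq_getElem?_getD, List.getElem?_eq_getElem (by simpa using hi)]
            exact List.getElem_mem _
          exact absurd (le_trans (hp.1 _ hmem) hc) hy
        · intro hc; omega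

lemma pvChain_keep (w : Int) : ∀ a b : List Int, (∀ x ∈ a, ¬ (w + x ≤ 3)) →
    pvChain w (a ++ b) = a ++ pvChain w b := by
  intro a
  induction a with
  | nil => intro b _; simp
  | cons x a ih =>
    intro b h
    simp only [List.cons_append, pvChain, if_neg (h x (by simp))]
    rw [ih b (fun y hy => h y (by simp [hy]))]

-- one trip of B equals one descending sweep on the first pos (sorted) elements
lemma pvTripF_chain : ∀ (fuel pos : Nat) (w : Int) (rem : List Int), pos ≤ fuel →
    pos ≤ rem.length → (rem.take pos).Pairwise (· ≤ ·) →
    pvTripF fuel w pos rem = (pvChain w (rem.take pos).reverse).reverse ++ rem.drop pos := by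
  intro fuel
  induction fuel with
  | zero =>
    intro pos w rem hf hpos hsort
    have hp0 : pos = 0 := by omega
    subst hp0
    rw [pvTripF]
    simp [pvChain]
  | succ fuel ih =>
    intro pos w rem hf hpos hsort
    set ys := rem.take pos with hys
    have hyslen : ys.length = pos := by simp [hys, hpos]
    set L := (ys.takeWhile (fun x => decide (x ≤ 3 - w))).length with hL
    have hLle : L ≤ pos := by
      rw [hL, ← hyslen]
      exact (List.takeWhile_sublist _).length_le
    have hbd : ∀ i, 0 ≤ i → i < pos → (rem.getD i 0 ≤ 3 - w ↔ i < L) := by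
      intro i _ hi
      have hgy : rem.getD i 0 = ys.getD i 0 := by
        rw [hys, List.getD_eq_getElem?_getD, List.getD_eq_getElem?_getD,
          List.getElem?_take_of_lt hi]
      rw [hgy]
      exact pvSorted_boundary (3 - w) ys hsort i (by omega)
    have hbs : pvBS rem (3 - w) 0 pos = L := by
      rw [pvBS_count rem (3 - w) L pos (fun i h2 => hbd i (by omega) h2)]
      omega
    rw [pvTripF]
    simp only [hbs]
    by_cases hL0 : L = 0
    · rw [if_pos hL0]
      have hall : ∀ x ∈ ys.reverse, ¬ (w + x ≤ 3) := by
        intro x hx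
        rw [List.mem_reverse] at hx
        obtain ⟨i, hi, hgi⟩ := List.getElem_of_mem hx
        intro hc
        have : ys.getD i 0 ≤ 3 - w := by
          rw [List.getD_eq_getElem?_getD, List.getElem?_eq_getElem hi]
          simp [hgi]; omega
        have := (pvSorted_boundary (3 - w) ys hsort i hi).1 this
        omega
      have hid := pvChain_keep w ys.reverse [] hall
      simp only [List.append_nil, pvChain] at hid
      rw [hid, List.reverse_reverse]
      conv_rhs => rw [hys]
      exact (List.take_append_drop pos rem).symm
    · rw [if_neg hL0]
      have hL1 : 1 ≤ L := by omega
      have hLlt : L - 1 < pos := by omega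
      have hLys : L ≤ ys.length := by omega
      -- the picked element
      have hpick : rem.getD (L - 1) 0 = ys.getD (L - 1) 0 := by
        rw [List.getD_eq_getElem?_getD (l := rem), List.getD_eq_getElem?_getD,
          hys, List.getElem?_take_of_lt hLlt]
      have hfit : w + ys.getD (L - 1) 0 ≤ 3 := by
        have := (hbd (L - 1) (by omega) (by omega)).2 (by omega)
        rw [hpick] at this; omega
      -- decompositions
      have hysdec : ys = ys.take (L - 1) ++ ys.getD (L - 1) 0 :: ys.drop L := by
        have hlt1 : L - 1 < ys.length := by omega
        have h1 : ys.take L = ys.take (L - 1) ++ [ys.getD (L - 1) 0] := by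
          have hL' : L = (L - 1) + 1 := by omega
          rw [hL', List.take_add_one, List.getElem?_eq_getElem hlt1]
          simp [List.getD_eq_getElem?_getD, List.getElem?_eq_getElem hlt1]
        calc ys = ys.take L ++ ys.drop L := (List.take_append_drop L ys).symm
          _ = _ := by rw [h1]; simp [List.append_assoc]
      have hdropbad : ∀ x ∈ (ys.drop L).reverse, ¬ (w + x ≤ 3) := by
        intro x hx
        rw [List.mem_reverse] at hx
        obtain ⟨i, hi, hgi⟩ := List.getElem_of_mem hx
        intro hc
        have hlen' : L + i < ys.length := by
          have := List.length_drop (l := ys) (i := L); omega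
        have hgd : ys.getD (L + i) 0 = x := by
          rw [List.getD_eq_getElem?_getD, List.getElem?_eq_getElem hlen']
          simp only [Option.getD_some]
          rw [← hgi]
          simp [List.getElem_drop]
        have := (pvSorted_boundary (3 - w) ys hsort (L + i) hlen').1 (by rw [hgd]; omega)
        omega
      -- chain on ys.reverse: keep the > t suffix, take ys[L-1], recurse
      have hchain : pvChain w ys.reverse
          = (ys.drop L).reverse ++ pvChain (w + ys.getD (L - 1) 0) (ys.take (L - 1)).reverse := by
        conv_lhs => rw [hysdec]
        rw [List.reverse_append, List.reverse_cons, List.append_assoc, List.singleton_append,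
          pvChain_keep w _ _ hdropbad]
        congr 1
        simp only [pvChain, if_pos hfit]
      -- the list after the pick
      have herase : rem.eraseIdx (L - 1) = ys.take (L - 1) ++ (ys.drop L ++ rem.drop pos) := by
        rw [List.eraseIdx_eq_take_drop_succ]
        have h1 : rem.take (L - 1) = ys.take (L - 1) := by
          rw [hys, List.take_take, min_eq_left (by omega)]
        have h2 : rem.drop (L - 1 + 1) = ys.drop L ++ rem.drop pos := by
          have hrem : rem = ys ++ rem.drop pos := by rw [hys, List.take_append_drop]
          have hstep : L - 1 + 1 = L := by omega
          conv_lhs => rw [hstep, hrem]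
          rw [List.drop_append]
          have : L - ys.length = 0 := by omega
          rw [this, List.drop_zero]
        rw [h1, h2]
      have htk : (rem.eraseIdx (L - 1)).take (L - 1) = ys.take (L - 1) := by
        rw [herase, List.take_left' (by simp [List.length_take]; omega)]
      have hdr : (rem.eraseIdx (L - 1)).drop (L - 1) = ys.drop L ++ rem.drop pos := by
        rw [herase, List.drop_left' (by simp [List.length_take]; omega)]
      have hlen' : L - 1 ≤ (rem.eraseIdx (L - 1)).length := by
        rw [List.length_eraseIdx]
        split <;> omega
      have hsort' : ((rem.eraseIdx (L - 1)).take (L - 1)).Pairwise (· ≤ ·) := by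
        rw [htk]
        exact List.Pairwise.sublist (List.take_sublist _ _) hsort
      rw [ih (L - 1) _ _ (by omega) hlen' hsort', htk, hdr, hpick, hchain,
        List.reverse_append, List.reverse_reverse, List.append_assoc]

-- B's outer loop counts the sweeps of pvGo on the descending list
lemma pvOuterF_go : ∀ (fuel : Nat) (xs : List Int), xs.length ≤ fuel → xs.Pairwise (· ≤ ·) →
    pvOuterF fuel xs = pvGo xs.reverse := by
  intro fuel
  induction fuel with
  | zero =>
    intro xs hn _
    have : xs = [] := List.eq_nil_of_length_eq_zero (by omega)
    subst this
    rw [pvOuterF]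
    simp [pvGo]
  | succ fuel ih =>
    intro xs hn hsort
    by_cases hxs : xs = []
    · subst hxs
      rw [pvOuterF, dif_pos rfl]
      simp [pvGo]
    · rw [pvOuterF, dif_neg hxs]
      have hdec : xs.dropLast ++ [xs.getLast hxs] = xs := List.dropLast_append_getLast hxs
      have hrev : xs.reverse = xs.getLast hxs :: xs.dropLast.reverse := by
        conv_lhs => rw [← hdec]
        rw [List.reverse_append]
        rfl
      have hsortd : xs.dropLast.Pairwise (· ≤ ·) :=
        List.Pairwise.sublist (List.dropLast_sublist xs) hsort
      have htrip : pvTrip (xs.getLast hxs) xs.dropLast.length xs.dropLast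
          = (pvChain (xs.getLast hxs) xs.dropLast.reverse).reverse := by
        unfold pvTrip
        rw [pvTripF_chain xs.dropLast.length xs.dropLast.length (xs.getLast hxs) xs.dropLast
            le_rfl le_rfl (by rw [List.take_length]; exact hsortd),
          List.take_length, List.drop_length, List.append_nil]
      have hlend : xs.dropLast.length < xs.length := by
        cases xs with
        | nil => exact absurd rfl hxs
        | cons y ys => simp
      have hchlen : (pvChain (xs.getLast hxs) xs.dropLast.reverse).length
          ≤ xs.dropLast.length := by
        have := pvChain_length_le xs.dropLast.reverse (xs.getLast hxs)
        simpa using this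
      have hsortc : (pvChain (xs.getLast hxs) xs.dropLast.reverse).reverse.Pairwise (· ≤ ·) := by
        have hsub : (pvChain (xs.getLast hxs) xs.dropLast.reverse).reverse.Sublist xs.dropLast := by
          have := (pvChain_sublist xs.dropLast.reverse (xs.getLast hxs)).reverse
          simpa using this
        exact List.Pairwise.sublist hsub hsortd
      rw [htrip, ih _ (by simp; omega) hsortc, List.reverse_reverse, hrev, pvGo_cons]

-- ===== VERDICT (by name: the statement is the Claim_ definition above) =====
theorem efficientJanitor_spec : Claim_equal_efficientJanitor := by
  intro weight _
  unfold Spec_efficientJanitor efficientJanitor_alt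
  unfold pvOuter
  rw [pvA_char weight,
    pvOuterF_go (PySem.List.sorted weight (fun x => x) false).length _ le_rfl
      (by simpa using PySem.List.sorted_pairwise weight (fun x => x))]
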